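-- pv_equiv track=rewrite | github.com/Gitphin/school_projects | CSCI 1133/Projects/hw04/keyboard.py | flag_keys
-- ===== SOURCE A (Python) =====
-- def flag_keys(phrase, limit = 2):
--     # splits the phrase into a list
--     txt = phrase.split()
--     # empty list to store flagged characters
--     flags = []
--
--     for i in txt:
--         for j in i:
--             # checks the char count for each word in phrase if they surpass limit
--             if i.count(j) > limit:
--                 # if yes, appends to the list flags
--                 flags.append(j)
--     # turns the flags list into a set to eliminate repeats
--     set_flags = set(flags)
--     # turns the set_flags set into a sorted list
--     repeats = sorted(list(set_flags))
--     # returns the list of repeating characters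
--     return repeats
-- ===== SOURCE B (Python) =====
-- def flag_keys(phrase, limit=2):
--     words = phrase.split()
--     candidates = {c for w in words for c in w}
--     return sorted(c for c in candidates if any(w.count(c) > limit for w in words))
-- ===== Notes on version B (the rewrite author's own statement) =====
-- stated objective: faster
-- what changed: B inverts the loop nesting: it builds the set of distinct characters occurring in any word once, then for each candidate character checks (short-circuiting) whether some word contains it more than limit times, instead of calling .count for every occurrence of every character and deduplicating afterward.
import Mathlib
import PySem

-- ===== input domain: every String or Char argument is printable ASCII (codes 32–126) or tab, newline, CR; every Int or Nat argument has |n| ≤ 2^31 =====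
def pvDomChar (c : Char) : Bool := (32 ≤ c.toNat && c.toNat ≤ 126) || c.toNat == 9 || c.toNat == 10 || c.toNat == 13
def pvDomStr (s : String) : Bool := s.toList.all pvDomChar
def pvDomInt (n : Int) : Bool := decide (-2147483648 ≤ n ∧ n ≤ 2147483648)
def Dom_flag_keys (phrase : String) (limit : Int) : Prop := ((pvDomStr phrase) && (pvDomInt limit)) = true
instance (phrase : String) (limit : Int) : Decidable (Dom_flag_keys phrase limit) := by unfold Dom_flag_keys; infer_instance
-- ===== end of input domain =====

-- B flips the nesting: one pass builds the distinct characters of the words, then each candidate is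
-- checked (short-circuiting) against the words, instead of appending every occurrence and deduplicating.

-- ===== PORT A =====
-- Python's 1-character string `j` (an element of `for j in i`) as a Lean String.
def pvChr (c : Char) : String := String.ofList [c]

-- `i.count(j)` for the single-character needle `j`: exactly the number of chars of `i` equal to `j`.
def pvCount1 (i : String) (j : Char) : Nat := i.toList.count j

def flag_keys (phrase : String) (limit : Int) : List String :=
  let txt := PySem.Str.split₀ phrase
  let flags := txt.foldl (fun flags i =>
    i.toList.foldl (fun flags j =>
      if limit < (pvCount1 i j : Int) then flags ++ [pvChr j] else flags) flags) []
  let set_flags := PySem.Set.ofList flags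
  PySem.List.sorted set_flags (fun x => x) false

-- ===== PORT B =====
-- `w.count(c)` where `c` is one of the single-character candidate strings (exact on those).
def pvCountS (w : String) (c : String) : Nat := w.toList.countP (fun ch => pvChr ch == c)

def flag_keys_alt (phrase : String) (limit : Int) : List String :=
  let words := PySem.Str.split₀ phrase
  let candidates : PySem.Set String :=
    PySem.Set.ofList (words.flatMap (fun w => w.toList.map pvChr))
  PySem.List.sorted
    (candidates.filter (fun c => words.any (fun w => limit < (pvCountS w c : Nat)))) (fun x => x) false

-- ===== PRECONDITION & SPEC =====
def Spec_flag_keys (phrase : String) (limit : Int) (out : List String) : Prop := out = flag_keys_alt phrase limit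
instance (phrase : String) (limit : Int) (out : List String) : Decidable (Spec_flag_keys phrase limit out) := by unfold Spec_flag_keys; infer_instance

-- ===== CLAIM (what is proved, stated in full; the proofs are below) =====
def Claim_equal_flag_keys : Prop := ∀ (phrase : String) (limit : Int), Dom_flag_keys phrase limit → Spec_flag_keys phrase limit (flag_keys phrase limit)

-- ===== LEMMAS AND PROOFS =====

theorem pvChr_inj : Function.Injective pvChr := by
  intro a b h
  have h2 := congrArg String.toList h
  simpa [pvChr] using h2

theorem pvCountS_chr (w : String) (j : Char) : pvCountS w (pvChr j) = pvCount1 w j := by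
  unfold pvCountS pvCount1
  rw [List.count_eq_countP]
  apply List.countP_congr
  intro ch _
  constructor
  · intro h; exact beq_iff_eq.mpr (pvChr_inj (beq_iff_eq.mp h))
  · intro h; exact beq_iff_eq.mpr (congrArg pvChr (beq_iff_eq.mp h))

-- A's accumulation loop as a flatMap of per-word filtered character lists.
theorem flagsA_eq (words : List String) (limit : Int) :
    words.foldl (fun flags i =>
      i.toList.foldl (fun flags j =>
        if limit < (pvCount1 i j : Int) then flags ++ [pvChr j] else flags) flags) [] =
    words.flatMap (fun i =>
      (i.toList.filter (fun j => decide (limit < (pvCount1 i j : Int)))).map pvChr) := by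
  have hstep : (fun (flags : List String) (i : String) =>
      i.toList.foldl (fun flags j =>
        if limit < (pvCount1 i j : Int) then flags ++ [pvChr j] else flags) flags) =
      (fun (flags : List String) (i : String) =>
        flags ++ (i.toList.filter (fun j => decide (limit < (pvCount1 i j : Int)))).map pvChr) := by
    funext flags i
    exact PySem.List.foldl_append_ite (fun j => limit < (pvCount1 i j : Int)) pvChr i.toList flags
  rw [hstep]
  simpa using PySem.List.foldl_append_eq_flatMap
    (fun i => (i.toList.filter (fun j => decide (limit < (pvCount1 i j : Int)))).map pvChr) words []

-- The two deduplicated lists contain the same strings.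
theorem mem_iff (words : List String) (limit : Int) (x : String) :
    (x ∈ words.flatMap (fun i =>
      (i.toList.filter (fun j => decide (limit < (pvCount1 i j : Int)))).map pvChr)) ↔
    (x ∈ words.flatMap (fun w => w.toList.map pvChr) ∧
      words.any (fun w => limit < (pvCountS w x : Nat)) = true) := by
  simp only [List.mem_flatMap, List.mem_map, List.mem_filter, List.any_eq_true, decide_eq_true_eq]
  constructor
  · rintro ⟨w, hw, j, ⟨hj, hc⟩, rfl⟩
    exact ⟨⟨w, hw, j, hj, rfl⟩, ⟨w, hw, by rwa [pvCountS_chr]⟩⟩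
  · rintro ⟨⟨w1, hw1, j, hj1, rfl⟩, ⟨w2, hw2, hc2⟩⟩
    rw [pvCountS_chr] at hc2
    by_cases hmem : j ∈ w2.toList
    · exact ⟨w2, hw2, j, ⟨hmem, hc2⟩, rfl⟩
    · refine ⟨w1, hw1, j, ⟨hj1, ?_⟩, rfl⟩
      have h0 : pvCount1 w2 j = 0 := by
        unfold pvCount1; exact List.count_eq_zero.mpr hmem
      have hneg : limit < 0 := by rw [h0] at hc2; exact_mod_cast hc2
      exact lt_of_lt_of_le hneg (by exact_mod_cast Nat.zero_le _)

-- ===== VERDICT (by name: the statement is the Claim_ definition above) =====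
theorem flag_keys_spec : Claim_equal_flag_keys := by
  intro phrase limit _
  unfold Spec_flag_keys flag_keys flag_keys_alt
  simp only [flagsA_eq]
  apply PySem.List.sorted_eq_sorted_of_perm _ _ _ (fun h₁ h₂ h => h)
  apply (List.perm_ext_iff_of_nodup (PySem.Set.nodup_ofList _) ((PySem.Set.nodup_ofList _).filter _)).2
  intro x
  rw [PySem.Set.mem_ofList, List.mem_filter, PySem.Set.mem_ofList]
  simpa using mem_iff (PySem.Str.split₀ phrase) limit x
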